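-- pv_equiv track=rewrite | github.com/openvstorage/automation-lib | helpers/backend.py | get_local_stack_alias
-- ===== SOURCE A (Python) =====
-- def get_local_stack_alias(disk_object):
--     """
--     Fetches the object with the alias that is present in the local_stack object
--     :param disk_object: object with disk info
--     :type disk_object: dict
--     :return: path of the disk
--     :rtype: str
--     """
--     alias_prefixes = ['ata', 'scsi', 'virtio']
--     for disk_type in alias_prefixes:
--         found_aliases = [x for x in disk_object["aliases"] if x.rsplit('/', 1)[-1].startswith(disk_type)]
--         if len(found_aliases) == 0:
--             continue
--         else:
--             return found_aliases[0].rsplit('/', 1)[-1]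
--     raise RuntimeError('Could not find a suitable disk alias to use. Only looking for {0} and object has {1}'.format(alias_prefixes, disk_object))
-- ===== SOURCE B (Python) =====
-- def get_local_stack_alias(disk_object):
--     """
--     Fetches the object with the alias that is present in the local_stack object
--     (single pass: build a prefix -> first matching basename table, then pick by priority)
--     """
--     alias_prefixes = ['ata', 'scsi', 'virtio']
--     table = {}
--     for alias in disk_object["aliases"]:
--         base = alias.rsplit('/', 1)[-1]
--         for prefix in alias_prefixes:
--             if base.startswith(prefix):
--                 table.setdefault(prefix, base)
--                 break
--     for prefix in alias_prefixes:
--         if prefix in table: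
--             return table[prefix]
--     raise RuntimeError('Could not find a suitable disk alias to use. Only looking for {0} and object has {1}'.format(alias_prefixes, disk_object))
-- ===== Notes on version B (the rewrite author's own statement) =====
-- stated objective: alternative
-- what changed: Replaces the per-prefix repeated scans (a fresh filter of all aliases for each prefix) by one pass over the aliases that builds a prefix->first-basename table via setdefault, followed by a priority lookup over the three prefixes.
import Mathlib
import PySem

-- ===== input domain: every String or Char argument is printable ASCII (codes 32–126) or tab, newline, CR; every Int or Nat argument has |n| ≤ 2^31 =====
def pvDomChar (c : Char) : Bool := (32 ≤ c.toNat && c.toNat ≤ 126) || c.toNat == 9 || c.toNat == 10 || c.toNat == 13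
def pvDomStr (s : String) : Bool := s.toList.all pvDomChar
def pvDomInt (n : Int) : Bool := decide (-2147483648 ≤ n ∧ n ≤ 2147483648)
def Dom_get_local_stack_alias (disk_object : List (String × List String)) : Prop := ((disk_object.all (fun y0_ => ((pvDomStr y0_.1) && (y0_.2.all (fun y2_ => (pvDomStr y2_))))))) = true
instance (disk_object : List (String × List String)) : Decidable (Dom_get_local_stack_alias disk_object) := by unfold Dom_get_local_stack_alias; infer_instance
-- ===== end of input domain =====

-- B builds a prefix->first-basename table in ONE pass over the aliases (setdefault) and then
-- does a priority lookup, instead of A's fresh filter of the whole alias list per prefix.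
-- Pre_ excludes exactly the inputs where A raises (KeyError on a missing "aliases" key,
-- RuntimeError when no alias basename starts with a known prefix); B raises identically there.

-- ===== PORT A =====
-- x.rsplit('/', 1)[-1] : the part of x after the last '/' (whole string if no '/'); exact, hand-ported.
def pvBase (s : String) : String := String.ofList ((s.toList.reverse.takeWhile (fun c => c ≠ '/')).reverse)

-- the 'for disk_type in alias_prefixes' loop of A
def pvFindA (aliases : List String) : List String → Option String
  | [] => none
  | disk_type :: rest =>
      let found := aliases.filter (fun x => PySem.Str.startswith (pvBase x) disk_type)
      if found.length = 0 then pvFindA aliases rest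
      else some (pvBase (found.headD ""))   -- found_aliases[0] (found is nonempty here)

def get_local_stack_alias (disk_object : List (String × List String)) : String :=
  match (PySem.Dict.mk disk_object).get? "aliases" with
  | none => ""   -- KeyError: excluded by Pre_
  | some aliases =>
      match pvFindA aliases ["ata", "scsi", "virtio"] with
      | some r => r
      | none => ""   -- RuntimeError: excluded by Pre_

-- ===== PORT B =====
-- inner 'for prefix in alias_prefixes: if base.startswith(prefix): … break'
def pvClassify (base : String) : Option String :=
  if PySem.Str.startswith base "ata" then some "ata"
  else if PySem.Str.startswith base "scsi" then some "scsi"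
  else if PySem.Str.startswith base "virtio" then some "virtio"
  else none

-- one iteration of B's single pass: table.setdefault(prefix, base)
def pvStep (d : PySem.Dict String String) (a_ : String) : PySem.Dict String String :=
  let base := pvBase a_
  match pvClassify base with
  | some k => if d.contains k then d else d.insert k base
  | none => d

def pvTable (aliases : List String) : PySem.Dict String String :=
  aliases.foldl pvStep PySem.Dict.empty

def get_local_stack_alias_alt (disk_object : List (String × List String)) : String :=
  match (PySem.Dict.mk disk_object).get? "aliases" with
  | none => ""   -- KeyError: excluded by Pre_
  | some aliases =>
      let t := pvTable aliases
      match t.get? "ata" with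
      | some v => v
      | none =>
        match t.get? "scsi" with
        | some v => v
        | none =>
          match t.get? "virtio" with
          | some v => v
          | none => ""   -- RuntimeError: excluded by Pre_

-- ===== PRECONDITION & SPEC =====
-- Pre_ excludes exactly the inputs on which A raises: a dict without an "aliases" key
-- (KeyError) or one whose aliases contain no basename starting with ata/scsi/virtio (RuntimeError).
def Pre_get_local_stack_alias (disk_object : List (String × List String)) : Prop :=
  (((PySem.Dict.mk disk_object).get? "aliases").getD []).any
    (fun x => PySem.Str.startswith (pvBase x) "ata" || PySem.Str.startswith (pvBase x) "scsi" ||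
      PySem.Str.startswith (pvBase x) "virtio") = true

instance (disk_object : List (String × List String)) : Decidable (Pre_get_local_stack_alias disk_object) := by
  unfold Pre_get_local_stack_alias; infer_instance

def pvWitness_get_local_stack_alias : (List (String × List String)) :=
  [("aliases", ["/dev/disk/ata-QEMU_HARDDISK_1", "scsi-x"])]

def Spec_get_local_stack_alias (disk_object : List (String × List String)) (out : String) : Prop := out = get_local_stack_alias_alt disk_object
instance (disk_object : List (String × List String)) (out : String) : Decidable (Spec_get_local_stack_alias disk_object out) := by unfold Spec_get_local_stack_alias; infer_instance

-- ===== CLAIM (what is proved, stated in full; the proofs are below) =====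
def Claim_equal_get_local_stack_alias : Prop := ∀ (disk_object : List (String × List String)), Dom_get_local_stack_alias disk_object → Pre_get_local_stack_alias disk_object → Spec_get_local_stack_alias disk_object (get_local_stack_alias disk_object)

-- ===== LEMMAS AND PROOFS =====

-- two strings with different first characters cannot both be prefixes of s
theorem pv_sw_excl (s p q : String) (cp cq : Char) (tp tq : List Char)
    (hp : p.toList = cp :: tp) (hq : q.toList = cq :: tq) (hne : cp ≠ cq)
    (h : PySem.Str.startswith s p = true) : PySem.Str.startswith s q = false := by
  by_contra hq'
  have hq2 : PySem.Str.startswith s q = true := by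
    cases hb : PySem.Str.startswith s q
    · exact absurd hb hq'
    · rfl
  rw [PySem.Str.startswith_eq, PySem.Chars.startswith_iff] at h hq2
  rcases h with ⟨t1, h1⟩
  rcases hq2 with ⟨t2, h2⟩
  rw [hp] at h1; rw [hq] at h2
  rw [← h1] at h2
  simp at h2
  exact hne h2.1.symm

theorem pv_classify_eq (b : String) (p : String)
    (hp : p = "ata" ∨ p = "scsi" ∨ p = "virtio") :
    (pvClassify b = some p) ↔ PySem.Str.startswith b p = true := by
  have hAS : PySem.Str.startswith b "ata" = true → PySem.Str.startswith b "scsi" = false :=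
    pv_sw_excl b "ata" "scsi" 'a' 's' ['t','a'] ['c','s','i'] rfl rfl (by decide)
  have hAV : PySem.Str.startswith b "ata" = true → PySem.Str.startswith b "virtio" = false :=
    pv_sw_excl b "ata" "virtio" 'a' 'v' ['t','a'] ['i','r','t','i','o'] rfl rfl (by decide)
  have hSV : PySem.Str.startswith b "scsi" = true → PySem.Str.startswith b "virtio" = false :=
    pv_sw_excl b "scsi" "virtio" 's' 'v' ['c','s','i'] ['i','r','t','i','o'] rfl rfl (by decide)
  have pv_ne_true : ∀ {bb : Bool}, bb = false → ¬ (bb = true) := by intro bb h hh; rw [h] at hh; exact Bool.false_ne_true hh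
  unfold pvClassify
  rcases hp with rfl | rfl | rfl
  · constructor
    · intro h; split_ifs at h with h1 h2 h3 <;> simp_all
    · intro h; rw [if_pos h]
  · constructor
    · intro h; split_ifs at h with h1 h2 h3 <;> simp_all
    · intro h
      have h1 : PySem.Str.startswith b "ata" = false := by
        cases ha : PySem.Str.startswith b "ata"
        · rfl
        · rw [hAS ha] at h; exact absurd h Bool.false_ne_true
      rw [if_neg (pv_ne_true h1), if_pos h]
  · constructor
    · intro h; split_ifs at h with h1 h2 h3 <;> simp_all
    · intro h
      have h1 : PySem.Str.startswith b "ata" = false := by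
        cases ha : PySem.Str.startswith b "ata"
        · rfl
        · rw [hAV ha] at h; exact absurd h Bool.false_ne_true
      have h2 : PySem.Str.startswith b "scsi" = false := by
        cases hs : PySem.Str.startswith b "scsi"
        · rfl
        · rw [hSV hs] at h; exact absurd h Bool.false_ne_true
      rw [if_neg (pv_ne_true h1), if_neg (pv_ne_true h2), if_pos h]

-- the single-pass table agrees with A's per-prefix filter
theorem pv_foldl_get (p : String) (hp : p = "ata" ∨ p = "scsi" ∨ p = "virtio")
    (aliases : List String) (d : PySem.Dict String String) :
    (aliases.foldl pvStep d).get? p =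
      ((d.get? p).or
        (((aliases.filter (fun x => PySem.Str.startswith (pvBase x) p)).head?).map pvBase)) := by
  induction aliases generalizing d with
  | nil => simp
  | cons x rest ih =>
    simp only [List.foldl_cons, ih (pvStep d x)]
    by_cases hm : PySem.Str.startswith (pvBase x) p = true
    · have hc : pvClassify (pvBase x) = some p := (pv_classify_eq _ p hp).mpr hm
      simp only [pvStep, hc]
      by_cases hcon : d.contains p = true
      · obtain ⟨v, hv⟩ : ∃ v, d.get? p = some v := by
          rcases h : d.get? p with _ | v
          · rw [PySem.Dict.get?_eq_none_iff_contains] at h; simp_all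
          · exact ⟨v, rfl⟩
        simp [hcon, hv, Option.or]
      · have hnone : d.get? p = none := by
          rw [PySem.Dict.get?_eq_none_iff_contains]; simp_all
        simp [hcon, hnone, List.filter_cons, PySem.Dict.get?_insert_self, Option.or]
        rw [PySem.Str.startswith_eq] at hm
        exact ⟨x, by rw [if_pos hm]; rfl, rfl⟩
    · have hx : PySem.Str.startswith (pvBase x) p = false := by
        cases h : PySem.Str.startswith (pvBase x) p
        · rfl
        · exact absurd h hm
      have hstep : (pvStep d x).get? p = d.get? p := by
        rcases h : pvClassify (pvBase x) with _ | q
        · simp only [pvStep, h]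
        · have hq : p ≠ q := by
            intro rfl_eq; subst rfl_eq
            exact hm ((pv_classify_eq _ p hp).mp h)
          by_cases hcon : d.contains q = true
          · simp only [pvStep, h, if_pos hcon]
          · simp only [pvStep, h, if_neg hcon]
            exact PySem.Dict.get?_insert_of_ne _ _ hq
      rw [hstep]
      have hfc : (x :: rest).filter (fun y => PySem.Str.startswith (pvBase y) p) =
          rest.filter (fun y => PySem.Str.startswith (pvBase y) p) := by
        rw [List.filter_cons_of_neg]
        rw [hx]; exact Bool.false_ne_true
      rw [hfc]

-- ===== VERDICT (by name: the statement is the Claim_ definition above) =====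
theorem get_local_stack_alias_spec : Claim_equal_get_local_stack_alias := by
  intro disk_object _ hpre
  unfold Spec_get_local_stack_alias get_local_stack_alias get_local_stack_alias_alt
  unfold Pre_get_local_stack_alias at hpre
  rcases hget : (PySem.Dict.mk disk_object).get? "aliases" with _ | aliases
  · rfl
  · dsimp only
    rw [hget] at hpre
    simp only [Option.getD_some] at hpre
    have hA := pv_foldl_get "ata" (Or.inl rfl) aliases PySem.Dict.empty
    have hS := pv_foldl_get "scsi" (Or.inr (Or.inl rfl)) aliases PySem.Dict.empty
    have hV := pv_foldl_get "virtio" (Or.inr (Or.inr rfl)) aliases PySem.Dict.empty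
    rw [PySem.Dict.get?_empty, Option.none_or] at hA hS hV
    simp only [pvTable]
    rw [hA, hS, hV]
    unfold pvFindA
    rcases hfa : aliases.filter (fun x => PySem.Str.startswith (pvBase x) "ata") with _ | ⟨ya, ta⟩
    · dsimp only
      simp only [List.length_nil, List.head?_nil, Option.map_none]
      rw [if_true]
      unfold pvFindA
      rcases hfs : aliases.filter (fun x => PySem.Str.startswith (pvBase x) "scsi") with _ | ⟨ys, ts⟩
      · dsimp only
        simp only [List.length_nil, List.head?_nil, Option.map_none]
        rw [if_true]
        unfold pvFindA
        rcases hfv : aliases.filter (fun x => PySem.Str.startswith (pvBase x) "virtio") with _ | ⟨yv, tv⟩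
        · -- all three filters empty: contradicts Pre_
          exfalso
          rw [List.any_eq_true] at hpre
          rcases hpre with ⟨x, hx, hmatch⟩
          simp only [Bool.or_eq_true] at hmatch
          rcases hmatch with (h | h) | h
          · have hmem : x ∈ aliases.filter (fun x => PySem.Str.startswith (pvBase x) "ata") :=
              List.mem_filter.mpr ⟨hx, h⟩
            rw [hfa] at hmem; exact (List.not_mem_nil).elim hmem
          · have hmem : x ∈ aliases.filter (fun x => PySem.Str.startswith (pvBase x) "scsi") :=
              List.mem_filter.mpr ⟨hx, h⟩
            rw [hfs] at hmem; exact (List.not_mem_nil).elim hmem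
          · have hmem : x ∈ aliases.filter (fun x => PySem.Str.startswith (pvBase x) "virtio") :=
              List.mem_filter.mpr ⟨hx, h⟩
            rw [hfv] at hmem; exact (List.not_mem_nil).elim hmem
        · dsimp only
          simp only [List.length_cons, List.head?_cons, Option.map_some, List.headD_cons]
          rw [if_neg (by omega)]
      · dsimp only
        simp only [List.length_cons, List.head?_cons, Option.map_some, List.headD_cons]
        rw [if_neg (by omega)]
    · dsimp only
      simp only [List.length_cons, List.head?_cons, Option.map_some, List.headD_cons]
      rw [if_neg (by omega)]
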